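-- pv_equiv track=rewrite | github.com/tonyvu2014/algorithm | map/find_longest_word.py | is_word_subsequence
-- ===== SOURCE A (Python) =====
-- def is_word_subsequence(letter_positions, word):
--     current_position = -1
--     for c in list(word):
--         if c not in letter_positions:
--             return False
--         found = False
--         positions = letter_positions[c]
--         for p in positions:
--             if p <= current_position:
--                 continue
--             else:
--                 current_position = p
--                 found = True
--                 break
--         if not found:
--             return False
--
--     return True
-- ===== SOURCE B (Python) =====
-- def is_word_subsequence(letter_positions, word):
--     # Binary search (hand-written upper bound) into each char's sorted position list.
--     current_position = -1
--     for c in word: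
--         if c not in letter_positions:
--             return False
--         positions = letter_positions[c]
--         lo, hi = 0, len(positions)
--         while lo < hi:
--             mid = (lo + hi) // 2
--             if positions[mid] <= current_position:
--                 lo = mid + 1
--             else:
--                 hi = mid
--         if lo == len(positions):
--             return False
--         current_position = positions[lo]
--     return True
-- ===== Notes on version B (the rewrite author's own statement) =====
-- stated objective: faster
-- what changed: Replaces A's linear scan of each character's position list by a hand-written binary search (upper bound) into the sorted list, O(log k) per character instead of O(k).
-- outside the precondition, e.g. on is_word_subsequence({'a': [2], 'b': [1, 10, 0, 5], 'c': [7]}, 'abc'): A returns False, B returns True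
import Mathlib
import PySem

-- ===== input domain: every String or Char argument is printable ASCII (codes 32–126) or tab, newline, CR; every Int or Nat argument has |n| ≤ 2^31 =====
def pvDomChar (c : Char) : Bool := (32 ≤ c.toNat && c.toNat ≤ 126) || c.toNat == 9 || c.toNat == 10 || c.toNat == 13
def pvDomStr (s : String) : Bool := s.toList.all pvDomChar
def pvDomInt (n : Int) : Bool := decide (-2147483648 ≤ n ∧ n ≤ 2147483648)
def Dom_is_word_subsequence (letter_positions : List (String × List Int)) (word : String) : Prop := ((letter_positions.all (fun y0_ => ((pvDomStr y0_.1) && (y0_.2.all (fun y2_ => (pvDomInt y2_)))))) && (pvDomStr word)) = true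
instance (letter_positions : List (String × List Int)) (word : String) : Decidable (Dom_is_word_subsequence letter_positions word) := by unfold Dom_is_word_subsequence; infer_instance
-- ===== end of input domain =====

-- B replaces A's linear scan of each character's position list by a hand-written binary
-- search (upper bound) into the sorted list: O(log k) per character instead of O(k).

-- ===== PORT A =====
-- A's inner for-loop: skip positions ≤ current_position, take (break at) the first larger one.
def pvFindGT (cur : Int) : List Int → Option Int
  | [] => none
  | p :: ps => if p ≤ cur then pvFindGT cur ps else some p

-- A's outer for-loop over the characters of word (dict lookup = first match).
def pvGoA (lp : List (String × List Int)) : List Char → Int → Bool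
  | [], _ => true
  | c :: cs, cur =>
    match List.lookup (String.mk [c]) lp with
    | none => false
    | some ps =>
      match pvFindGT cur ps with
      | none => false
      | some p => pvGoA lp cs p

def is_word_subsequence (letter_positions : List (String × List Int)) (word : String) : Bool :=
  pvGoA letter_positions word.toList (-1)

-- ===== PORT B =====
-- B's while-loop: binary search for the first index with positions[mid] > cur.
-- positions.getD mid 0 is exact for Python's positions[mid]: mid is always in range (lo < hi ≤ len).
-- fuel = hi - lo bounds the iteration count (each step strictly shrinks the interval);
-- it only makes the same while-loop structurally total, it never changes the computation.
def pvBSearch (ps : List Int) (cur : Int) : Nat → Nat → Nat → Nat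
  | 0, lo, _ => lo
  | fuel + 1, lo, hi =>
    if lo < hi then
      let mid := (lo + hi) / 2
      if ps.getD mid 0 ≤ cur then pvBSearch ps cur fuel (mid + 1) hi
      else pvBSearch ps cur fuel lo mid
    else lo

def pvGoB (lp : List (String × List Int)) : List Char → Int → Bool
  | [], _ => true
  | c :: cs, cur =>
    match List.lookup (String.mk [c]) lp with
    | none => false
    | some ps =>
      let i := pvBSearch ps cur ps.length 0 ps.length
      if i = ps.length then false else pvGoB lp cs (ps.getD i 0)

def is_word_subsequence_alt (letter_positions : List (String × List Int)) (word : String) : Bool :=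
  pvGoB letter_positions word.toList (-1)

-- ===== PRECONDITION & SPEC =====
-- Pre_ excludes inputs where some position list actually consulted (the first-match entry of a
-- character of word) is unsorted: there A's first-match linear scan and B's binary search may
-- select different positions, and neither choice is specified.
def pvSortedB : List Int → Bool
  | [] => true
  | [_] => true
  | a :: b :: t => a ≤ b && pvSortedB (b :: t)
def Pre_is_word_subsequence (letter_positions : List (String × List Int)) (word : String) : Prop :=
  (word.toList.all fun c =>
    pvSortedB ((List.lookup (String.mk [c]) letter_positions).getD [])) = true
instance (letter_positions : List (String × List Int)) (word : String) : Decidable (Pre_is_word_subsequence letter_positions word) := by unfold Pre_is_word_subsequence; infer_instance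

def pvWitness_is_word_subsequence : (List (String × List Int)) × String :=
  ([("a", [0, 2]), ("b", [1, 3])], "ab")

def Spec_is_word_subsequence (letter_positions : List (String × List Int)) (word : String) (out : Bool) : Prop := out = is_word_subsequence_alt letter_positions word
instance (letter_positions : List (String × List Int)) (word : String) (out : Bool) : Decidable (Spec_is_word_subsequence letter_positions word out) := by unfold Spec_is_word_subsequence; infer_instance

-- ===== CLAIM (what is proved, stated in full; the proofs are below) =====
def Claim_equal_is_word_subsequence : Prop := ∀ (letter_positions : List (String × List Int)) (word : String), Dom_is_word_subsequence letter_positions word → Pre_is_word_subsequence letter_positions word → Spec_is_word_subsequence letter_positions word (is_word_subsequence letter_positions word)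

-- ===== LEMMAS AND PROOFS =====

theorem pvGetD_mono {ps : List Int} (hs : List.Pairwise (· ≤ ·) ps) {i j : Nat}
    (hij : i ≤ j) (hj : j < ps.length) : ps.getD i 0 ≤ ps.getD j 0 := by
  rcases Nat.lt_or_ge i j with h | h
  · rw [List.getD_eq_getElem ps 0 (by omega), List.getD_eq_getElem ps 0 hj]
    exact List.pairwise_iff_getElem.mp hs i j (by omega) hj h
  · have : i = j := by omega
    subst this; exact le_refl _

theorem pvBSearch_spec {ps : List Int} {cur : Int} (hs : List.Pairwise (· ≤ ·) ps) :
    ∀ (fuel lo hi : Nat), hi - lo ≤ fuel → lo ≤ hi → hi ≤ ps.length →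
    (∀ j, j < lo → ps.getD j 0 ≤ cur) →
    (∀ j, hi ≤ j → j < ps.length → cur < ps.getD j 0) →
    (∀ j, j < pvBSearch ps cur fuel lo hi → ps.getD j 0 ≤ cur) ∧
      (pvBSearch ps cur fuel lo hi < ps.length → cur < ps.getD (pvBSearch ps cur fuel lo hi) 0) ∧
      pvBSearch ps cur fuel lo hi ≤ ps.length := by
  intro fuel
  induction fuel with
  | zero =>
    intro lo hi hf hlo hhi h1 h2
    have heq : lo = hi := by omega
    rw [pvBSearch]
    exact ⟨h1, fun h => h2 lo (by omega) h, by omega⟩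
  | succ n ih =>
    intro lo hi hf hlo hhi h1 h2
    rw [pvBSearch]
    by_cases hlt : lo < hi
    · rw [if_pos hlt]
      simp only []
      by_cases hmid : ps.getD ((lo + hi) / 2) 0 ≤ cur
      · rw [if_pos hmid]
        refine ih ((lo + hi) / 2 + 1) hi (by omega) (by omega) hhi ?_ h2
        intro j hj
        rcases Nat.lt_or_ge j lo with h | h
        · exact h1 j h
        · exact le_trans (pvGetD_mono hs (by omega) (by omega)) hmid
      · rw [if_neg hmid]
        refine ih lo ((lo + hi) / 2) (by omega) (by omega) (by omega) h1 ?_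
        intro j hj hjl
        exact lt_of_lt_of_le (by omega : cur < ps.getD ((lo + hi) / 2) 0)
          (pvGetD_mono hs hj hjl)
    · rw [if_neg hlt]
      exact ⟨h1, fun h => h2 lo (by omega) h, by omega⟩

theorem pvDropWhile_eq_drop {p : Int → Bool} :
    ∀ (ps : List Int) (i : Nat), i ≤ ps.length →
    (∀ j, j < i → p (ps.getD j 0) = true) →
    (i < ps.length → p (ps.getD i 0) = false) →
    ps.dropWhile p = ps.drop i := by
  intro ps
  induction ps with
  | nil =>
    intro i h _ _
    have : i = 0 := by simpa using h
    subst this; simp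
  | cons a as ih =>
    intro i hle h1 h2
    cases i with
    | zero =>
      have ha : p a = false := by simpa using h2 (by simp)
      simp [List.dropWhile_cons, ha]
    | succ n =>
      have ha : p a = true := by simpa using h1 0 (by omega)
      simp only [List.dropWhile_cons, ha, if_pos, List.drop_succ_cons]
      exact ih n (by simpa using hle)
        (fun j hj => by simpa using h1 (j + 1) (by omega))
        (fun h => by simpa using h2 (by simpa using Nat.succ_lt_succ h))

theorem pvFindGT_eq_dropWhile (cur : Int) (ps : List Int) :
    pvFindGT cur ps = (ps.dropWhile (fun p => decide (p ≤ cur))).head? := by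
  induction ps with
  | nil => rfl
  | cons a as ih =>
    by_cases h : a ≤ cur
    · simp [pvFindGT, List.dropWhile_cons, h, ih]
    · simp [pvFindGT, List.dropWhile_cons, h]

theorem pvStep_eq {ps : List Int} (hs : List.Pairwise (· ≤ ·) ps) (cur : Int) :
    pvFindGT cur ps =
      (if pvBSearch ps cur ps.length 0 ps.length = ps.length then none
       else some (ps.getD (pvBSearch ps cur ps.length 0 ps.length) 0)) := by
  obtain ⟨h1, h2, h3⟩ := pvBSearch_spec hs ps.length 0 ps.length (by omega) (by omega)
    (le_refl _) (by omega) (by omega)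
  set i := pvBSearch ps cur ps.length 0 ps.length with hi
  rw [pvFindGT_eq_dropWhile,
    pvDropWhile_eq_drop ps i h3 (fun j hj => by simpa using h1 j hj)
      (fun h => by simpa using not_le.mpr (h2 h))]
  by_cases hlen : i = ps.length
  · simp [hlen]
  · have hlt : i < ps.length := by omega
    rw [if_neg hlen, List.head?_drop, List.getElem?_eq_getElem hlt,
      List.getD_eq_getElem ps 0 hlt]

theorem pvSortedB_pairwise : ∀ l : List Int, pvSortedB l = true → List.Pairwise (· ≤ ·) l
  | [] => fun _ => List.Pairwise.nil
  | [a] => fun _ => by simp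
  | a :: b :: t => fun h => by
    have h1 : a ≤ b ∧ pvSortedB (b :: t) = true := by simpa [pvSortedB] using h
    have hp := pvSortedB_pairwise (b :: t) h1.2
    refine List.Pairwise.cons ?_ hp
    intro x hx
    rcases List.mem_cons.mp hx with rfl | hx
    · exact h1.1
    · exact le_trans h1.1 ((List.pairwise_cons.mp hp).1 x hx)

theorem pvGo_eq (lp : List (String × List Int)) :
    ∀ (cs : List Char) (cur : Int),
      (∀ c ∈ cs, pvSortedB ((List.lookup (String.mk [c]) lp).getD []) = true) →
      pvGoA lp cs cur = pvGoB lp cs cur := by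
  intro cs
  induction cs with
  | nil => intro cur _; rfl
  | cons c rest ih =>
    intro cur hp
    rw [pvGoA, pvGoB]
    cases hl : List.lookup (String.mk [c]) lp with
    | none => rfl
    | some ps =>
      have hs : List.Pairwise (· ≤ ·) ps := by
        have := hp c List.mem_cons_self
        rw [hl] at this
        exact pvSortedB_pairwise ps this
      have hrest := fun c' hc' => hp c' (List.mem_cons_of_mem c hc')
      simp only [pvStep_eq hs cur]
      by_cases hlen : pvBSearch ps cur ps.length 0 ps.length = ps.length
      · simp [hlen]
      · simp only [hlen, if_neg hlen, if_false]
        exact ih (ps.getD (pvBSearch ps cur ps.length 0 ps.length) 0) hrest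

-- ===== VERDICT (by name: the statement is the Claim_ definition above) =====
theorem is_word_subsequence_spec : Claim_equal_is_word_subsequence := by
  intro lp word _ hpre
  unfold Spec_is_word_subsequence is_word_subsequence is_word_subsequence_alt
  exact pvGo_eq lp word.toList (-1)
    (by simpa using List.all_eq_true.mp hpre)
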